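-- pv_equiv track=rewrite | github.com/xli1110/LC | BFS/Airbnb - Bomb Maze.py | dist_set
-- ===== SOURCE A (Python) =====
-- def dist_set(mat, X, Y):
--     """
--     O(XY) + O((X + Y)log(X + Y))
--     Generate the set of shortest distances.
--     """
--     # find distinct distances O(XY)
--     s = set()
--     for i in range(X):
--         for j in range(Y):
--             if mat[i][j] not in s:
--                 s.add(mat[i][j])
--
--     # sort the list O((X + Y)log(X + Y))
--     # the largest element this set should be (X + Y)
--     arr = list(s)
--     arr.sort()
--     return arr
-- ===== SOURCE B (Python) =====
-- def dist_set(mat, X, Y):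
--     # no set: collect every scanned value (duplicates included),
--     # sort the multiset, then drop adjacent duplicates in one linear scan
--     all_vals = []
--     for i in range(X):
--         for j in range(Y):
--             all_vals.append(mat[i][j])
--     all_vals.sort()
--     res = []
--     for v in all_vals:
--         if not res or res[-1] != v:
--             res.append(v)
--     return res
-- ===== Notes on version B (the rewrite author's own statement) =====
-- stated objective: alternative
-- what changed: Drops the hash set: B collects every scanned value including duplicates, sorts the whole multiset, and deduplicates by one adjacent-comparison scan, instead of A's membership-tested set build followed by sorting the distinct values.
import Mathlib
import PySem

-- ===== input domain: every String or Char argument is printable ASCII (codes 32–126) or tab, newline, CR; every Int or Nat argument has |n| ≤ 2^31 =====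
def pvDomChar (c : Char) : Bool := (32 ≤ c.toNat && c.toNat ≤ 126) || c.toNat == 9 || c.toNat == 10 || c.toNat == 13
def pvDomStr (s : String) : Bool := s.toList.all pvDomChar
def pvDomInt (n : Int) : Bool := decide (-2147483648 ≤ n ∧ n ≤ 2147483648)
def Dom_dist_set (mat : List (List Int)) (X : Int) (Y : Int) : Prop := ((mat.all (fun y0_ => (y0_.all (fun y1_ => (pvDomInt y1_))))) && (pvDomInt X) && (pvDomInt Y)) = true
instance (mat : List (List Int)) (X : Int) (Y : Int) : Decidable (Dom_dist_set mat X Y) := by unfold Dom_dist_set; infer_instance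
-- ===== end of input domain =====

-- B drops A's hash set: collect all scanned values with duplicates, sort the multiset, dedup by one adjacent scan (alternative).

-- ===== PORT A =====
def dist_set (mat : List (List Int)) (X : Int) (Y : Int) : List Int :=
  -- s = set(); for i in range(X): for j in range(Y): if mat[i][j] not in s: s.add(mat[i][j])
  -- mat[i][j] ported as pyGetD: in range under Pre_
  -- arr = list(s); arr.sort(); return arr  (sorted output: order-independent consumption of the set)
  PySem.List.sorted
    ((PySem.List.pyRange 0 X 1).foldl (fun s i =>
      (PySem.List.pyRange 0 Y 1).foldl (fun s j =>
        if ¬ PySem.Set.contains s (PySem.List.pyGetD (PySem.List.pyGetD mat i []) j 0) then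
          PySem.Set.add s (PySem.List.pyGetD (PySem.List.pyGetD mat i []) j 0)
        else s) s) (PySem.Set.empty : PySem.Set Int))
    (fun x => x) false

-- ===== PORT B =====
def dist_set_alt (mat : List (List Int)) (X : Int) (Y : Int) : List Int :=
  -- all_vals = []; for i in range(X): for j in range(Y): all_vals.append(mat[i][j])
  -- all_vals.sort()
  -- res = []; for v in all_vals: if not res or res[-1] != v: res.append(v)
  (PySem.List.sorted
      ((PySem.List.pyRange 0 X 1).foldl (fun acc i =>
        (PySem.List.pyRange 0 Y 1).foldl (fun acc j =>
          acc ++ [PySem.List.pyGetD (PySem.List.pyGetD mat i []) j 0]) acc) [])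
      (fun x => x) false).foldl
    (fun res v =>
      if res = [] ∨ PySem.List.pyGet? res (-1) ≠ some v then res ++ [v] else res) []

-- ===== PRECONDITION & SPEC =====
-- Pre_ excludes exactly the inputs where A raises IndexError: when both loops actually run
-- (0 < X and 0 < Y), every scanned index must be inside the matrix.
def Pre_dist_set (mat : List (List Int)) (X : Int) (Y : Int) : Prop :=
  0 < X → 0 < Y → X ≤ (mat.length : Int) ∧ ∀ row ∈ mat.take X.toNat, Y ≤ (row.length : Int)
instance (mat : List (List Int)) (X : Int) (Y : Int) : Decidable (Pre_dist_set mat X Y) := by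
  unfold Pre_dist_set; infer_instance
def pvWitness_dist_set : List (List Int) × Int × Int := ([[3, 1], [1, 2]], 2, 2)

def Spec_dist_set (mat : List (List Int)) (X : Int) (Y : Int) (out : List Int) : Prop := out = dist_set_alt mat X Y
instance (mat : List (List Int)) (X : Int) (Y : Int) (out : List Int) : Decidable (Spec_dist_set mat X Y out) := by unfold Spec_dist_set; infer_instance

-- ===== CLAIM (what is proved, stated in full; the proofs are below) =====
def Claim_equal_dist_set : Prop := ∀ (mat : List (List Int)) (X : Int) (Y : Int), Dom_dist_set mat X Y → Pre_dist_set mat X Y → Spec_dist_set mat X Y (dist_set mat X Y)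

-- ===== LEMMAS AND PROOFS =====

-- A's conditional insertion is exactly PySem.Set.add
lemma step_eq_add (s : PySem.Set Int) (v : Int) :
    (if ¬ PySem.Set.contains s v then PySem.Set.add s v else s) = PySem.Set.add s v := by
  by_cases h : PySem.Set.contains s v
  · rw [if_neg (by simpa using h)]
    unfold PySem.Set.add
    rw [if_pos h]
  · rw [if_pos (by simpa using h)]

-- A's double membership-tested loop builds the set of all scanned values
lemma gatherA (I J : List Int) (g : Int → Int → Int) :
    I.foldl (fun s i =>
        J.foldl (fun s j =>
          if ¬ PySem.Set.contains s (g i j) then PySem.Set.add s (g i j) else s) s)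
      (PySem.Set.empty : PySem.Set Int)
      = PySem.Set.ofList (I.flatMap (fun i => J.map (g i))) := by
  rw [PySem.List.foldl_congr_mem _ _
        (fun (s : PySem.Set Int) (i : Int) => (J.map (g i)).foldl PySem.Set.add s) _
        (fun s i _ => by
          show _ = (J.map (g i)).foldl PySem.Set.add s
          rw [List.foldl_map]
          exact PySem.List.foldl_congr_mem _ _ _ _ (fun s j _ => step_eq_add s (g i j)))]
  rw [PySem.Set.ofList_eq_foldl, List.flatMap, List.foldl_flatten, List.foldl_map]
  rfl

-- B's double append loop collects exactly the scanned values, in scan order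
lemma gatherB (I J : List Int) (g : Int → Int → Int) :
    I.foldl (fun acc i => J.foldl (fun acc j => acc ++ [g i j]) acc) []
      = I.flatMap (fun i => J.map (g i)) := by
  rw [PySem.List.foldl_congr_mem _ _
        (fun (acc : List Int) (i : Int) => acc ++ J.map (g i)) _
        (fun acc i _ => by
          show _ = acc ++ J.map (g i)
          exact PySem.List.foldl_append_singleton_eq_map (g i) J acc),
      PySem.List.foldl_append_eq_flatMap]
  simp

-- the last element of a strictly increasing list is its unique maximum
lemma last_of_max (acc : List Int) (hp : acc.Pairwise (· < ·)) (a : Int)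
    (ha : a ∈ acc) (hmax : ∀ b ∈ acc, b ≤ a) : acc.getLast? = some a := by
  induction acc with
  | nil => cases ha
  | cons x t ih =>
    have hx := List.pairwise_cons.mp hp
    cases t with
    | nil => simp at ha ⊢; simp [ha]
    | cons y u =>
      rw [List.getLast?_cons_cons]
      rcases List.mem_cons.mp ha with rfl | hmem
      · exact absurd (hmax y (by simp)) (by simpa using hx.1 y (by simp))
      · exact ih hx.2 hmem (fun b hb => hmax b (List.mem_cons_of_mem _ hb))

-- invariant of B's adjacent-dedup scan: on a ≤-sorted input it stays strictly
-- increasing and keeps exactly the members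
lemma dedup_fold_spec (S : List Int) :
    ∀ acc : List Int, S.Pairwise (· ≤ ·) → acc.Pairwise (· < ·) →
      (∀ a ∈ acc, ∀ b ∈ S, a ≤ b) →
      (S.foldl (fun res v =>
          if res = [] ∨ PySem.List.pyGet? res (-1) ≠ some v then res ++ [v] else res) acc).Pairwise (· < ·) ∧
      (∀ x, x ∈ S.foldl (fun res v =>
          if res = [] ∨ PySem.List.pyGet? res (-1) ≠ some v then res ++ [v] else res) acc
          ↔ x ∈ acc ∨ x ∈ S) := by
  induction S with
  | nil => intro acc _ hacc _; simpa using hacc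
  | cons v S' ih =>
    intro acc hS hacc hle
    have hS' := (List.pairwise_cons.mp hS).2
    have hvS' := (List.pairwise_cons.mp hS).1
    by_cases hc : acc = [] ∨ PySem.List.pyGet? acc (-1) ≠ some v
    · -- append v
      have hlt : ∀ a ∈ acc, a < v := by
        intro a ha
        have h1 : a ≤ v := hle a ha v (by simp)
        rcases lt_or_eq_of_le h1 with h | rfl
        · exact h
        · exfalso
          have hlast : acc.getLast? = some a :=
            last_of_max acc hacc a ha (fun b hb => hle b hb a (by simp))
          rcases hc with hnil | hne
          · simp [hnil] at ha
          · exact hne (by simpa [PySem.List.pyGet?_neg_one] using hlast)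
      have hacc' : (acc ++ [v]).Pairwise (· < ·) := by
        rw [List.pairwise_append]
        exact ⟨hacc, by simp, by simpa using hlt⟩
      have hle' : ∀ a ∈ acc ++ [v], ∀ b ∈ S', a ≤ b := by
        intro a ha b hb
        rcases List.mem_append.mp ha with h | h
        · exact hle a h b (List.mem_cons_of_mem _ hb)
        · simp at h; subst h; exact hvS' b hb
      have hrec := ih (acc ++ [v]) hS' hacc' hle'
      simp only [List.foldl_cons, if_pos hc]
      refine ⟨hrec.1, fun x => ?_⟩
      rw [hrec.2 x]
      simp [or_assoc, or_comm, or_left_comm]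
    · -- skip v: v is already the last element of acc
      obtain ⟨hc1, hc2⟩ := not_or.mp hc
      rw [not_not] at hc2
      have hvmem : v ∈ acc := by
        rw [PySem.List.pyGet?_neg_one] at hc2
        exact List.mem_of_getLast? hc2
      have hle' : ∀ a ∈ acc, ∀ b ∈ S', a ≤ b := by
        intro a ha b hb
        exact hle a ha b (List.mem_cons_of_mem _ hb)
      have hrec := ih acc hS' hacc hle'
      simp only [List.foldl_cons, if_neg hc]
      refine ⟨hrec.1, fun x => ?_⟩
      rw [hrec.2 x]
      constructor
      · rintro (h | h) <;> simp [h]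
      · rintro (h | h)
        · exact Or.inl h
        · rcases List.mem_cons.mp h with rfl | h
          · exact Or.inl hvmem
          · exact Or.inr h

-- ===== VERDICT (by name: the statement is the Claim_ definition above) =====
theorem dist_set_spec : Claim_equal_dist_set := by
  intro mat X Y _ _
  unfold Spec_dist_set dist_set dist_set_alt
  rw [gatherA (PySem.List.pyRange 0 X 1) (PySem.List.pyRange 0 Y 1)
        (fun i j => PySem.List.pyGetD (PySem.List.pyGetD mat i []) j 0),
      gatherB (PySem.List.pyRange 0 X 1) (PySem.List.pyRange 0 Y 1)
        (fun i j => PySem.List.pyGetD (PySem.List.pyGetD mat i []) j 0)]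
  set L := (PySem.List.pyRange 0 X 1).flatMap
    (fun i => (PySem.List.pyRange 0 Y 1).map
      (fun j => PySem.List.pyGetD (PySem.List.pyGetD mat i []) j 0)) with hL
  have hspec := dedup_fold_spec (PySem.List.sorted L (fun x => x) false) []
    (by simpa using PySem.List.sorted_pairwise L (fun x => x))
    (by simp) (by simp)
  set B := (PySem.List.sorted L (fun x => x) false).foldl (fun res v =>
      if res = [] ∨ PySem.List.pyGet? res (-1) ≠ some v then res ++ [v] else res) []
  have hmem : ∀ x, x ∈ B ↔ x ∈ PySem.Set.ofList L := by
    intro x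
    rw [(hspec.2 x), PySem.Set.mem_ofList, PySem.List.mem_sorted]
    simp
  refine PySem.List.sorted_eq_of_perm_of_pairwise_lt _ B (fun x => x) ?_ hspec.1
  refine (List.perm_ext_iff_of_nodup ?_ (PySem.Set.nodup_ofList L)).mpr hmem
  exact hspec.1.imp ne_of_lt
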